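-- pv_equiv track=rewrite | github.com/magoher/TFG_PeopleAnalytics_QCA | core/boolean_algebra.py | normalize_term
-- ===== SOURCE A (Python) =====
-- def normalize_term(term):
--     """
--     Sorts letters inside a term to canonical form.
--     Positive first, then negated, alphabetical.
--     """
--     term = term.replace(" ", "")
--     if not term:
--         return ""
--
--     factors = term.split("*")
--
--     # Separate positive and negated
--     positive = sorted([f for f in factors if not f.startswith("~")])
--     negated = sorted([f for f in factors if f.startswith("~")])
--
--     # Join: positive first, then negated
--     return "*".join(positive + negated)
-- ===== SOURCE B (Python) =====
-- def _before(a, b):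
--     """True iff factor a must precede factor b: positives before negated,
--     lexicographic within each class."""
--     an, bn = a.startswith("~"), b.startswith("~")
--     if an != bn:
--         return bn
--     return a < b
--
-- def normalize_term(term):
--     """
--     Sorts letters inside a term to canonical form.
--     Positive first, then negated, alphabetical.
--     """
--     term = term.replace(" ", "")
--     if not term:
--         return ""
--     out = []
--     for f in term.split("*"):
--         i = 0
--         while i < len(out) and not _before(f, out[i]):
--             i += 1
--         out.insert(i, f)
--     return "*".join(out)
-- ===== Notes on version B (the rewrite author's own statement) =====
-- stated objective: alternative
-- what changed: Replaces the partition-into-two-filtered-lists-then-two-library-sorts scheme by an online insertion sort: a single pass inserts each factor into its ordered position in an accumulator under an explicit comparator (positives before negated, lexicographic within each class); no library sort, no filtering passes.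
import Mathlib
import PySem

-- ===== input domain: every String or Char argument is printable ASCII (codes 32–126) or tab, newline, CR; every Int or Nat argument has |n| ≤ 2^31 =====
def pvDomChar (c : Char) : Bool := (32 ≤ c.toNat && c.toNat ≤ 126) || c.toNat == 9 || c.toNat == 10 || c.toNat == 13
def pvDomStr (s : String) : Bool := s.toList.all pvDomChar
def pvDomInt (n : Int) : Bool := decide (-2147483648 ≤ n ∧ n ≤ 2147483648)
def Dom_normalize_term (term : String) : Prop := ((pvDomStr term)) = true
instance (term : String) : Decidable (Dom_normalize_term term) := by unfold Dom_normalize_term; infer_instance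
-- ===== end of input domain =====

-- B: an online insertion sort — one pass inserting each factor into an ordered accumulator under an
-- explicit comparator (positives before negated, lexicographic within each class), replacing A's
-- two filtered lists each library-sorted (alternative decomposition; not claimed faster).

-- ===== PORT A =====
def normalize_term (term : String) : String :=
  let term := PySem.Str.replace term " " ""
  if term = "" then ""
  else
    let factors := (PySem.Str.split? term "*").getD []  -- sep "*" ≠ "": split? is some, exact
    let positive := PySem.List.sorted (factors.filter (fun f => !(PySem.Str.startswith f "~"))) (fun f => f)
    let negated := PySem.List.sorted (factors.filter (fun f => PySem.Str.startswith f "~")) (fun f => f)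
    PySem.Str.join "*" (positive ++ negated)

-- ===== PORT B =====
-- _before(a, b) from Source B
def pvBefore (a b : String) : Bool :=
  let an := PySem.Str.startswith a "~"
  let bn := PySem.Str.startswith b "~"
  if an ≠ bn then bn else decide (a < b)

-- the 'while … out.insert(i, f)' body: insert f before the first element it must precede
def pvInsertOrd (f : String) : List String → List String
  | [] => [f]
  | y :: ys => if pvBefore f y then f :: y :: ys else y :: pvInsertOrd f ys

def normalize_term_alt (term : String) : String :=
  let term := PySem.Str.replace term " " ""
  if term = "" then ""
  else
    PySem.Str.join "*"
      (((PySem.Str.split? term "*").getD []).foldl (fun acc f => pvInsertOrd f acc) [])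

-- ===== PRECONDITION & SPEC =====
def Spec_normalize_term (term : String) (out : String) : Prop := out = normalize_term_alt term
instance (term : String) (out : String) : Decidable (Spec_normalize_term term out) := by unfold Spec_normalize_term; infer_instance

-- ===== CLAIM (what is proved, stated in full; the proofs are below) =====
def Claim_equal_normalize_term : Prop := ∀ (term : String), Dom_normalize_term term → Spec_normalize_term term (normalize_term term)

-- ===== LEMMAS AND PROOFS =====

-- B's hand-rolled ordered insertion is insertBy under the composite-key strict order
theorem pvInsertOrd_eq_insertBy (x : String) (l : List String) :
    pvInsertOrd x l
      = PySem.List.insertBy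
          (fun a b => decide (PySem.Str.startswith a "~" < PySem.Str.startswith b "~")
            || (!decide (PySem.Str.startswith b "~" < PySem.Str.startswith a "~") && decide (a < b)))
          x l := by
  induction l with
  | nil => rfl
  | cons y ys ih =>
    have hcmp : pvBefore x y
        = (decide (PySem.Str.startswith x "~" < PySem.Str.startswith y "~")
            || (!decide (PySem.Str.startswith y "~" < PySem.Str.startswith x "~") && decide (x < y))) := by
      unfold pvBefore
      cases hx : PySem.Str.startswith x "~" <;> cases hy : PySem.Str.startswith y "~" <;> simp
    simp only [pvInsertOrd, PySem.List.insertBy, hcmp, ih]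

-- B's fold of ordered insertions is the composite-key sort
theorem foldl_pvInsertOrd_eq_sorted2 (xs : List String) :
    xs.foldl (fun acc f => pvInsertOrd f acc) []
      = PySem.List.sorted2 xs (fun f => PySem.Str.startswith f "~") (fun f => f) := by
  have h : ∀ (init : List String),
      xs.foldl (fun acc f => pvInsertOrd f acc) init
        = xs.foldl (fun acc f =>
            PySem.List.insertBy
              (fun a b => decide (PySem.Str.startswith a "~" < PySem.Str.startswith b "~")
                || (!decide (PySem.Str.startswith b "~" < PySem.Str.startswith a "~") && decide (a < b)))
              f acc) init := by
    induction xs with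
    | nil => intro _; rfl
    | cons y ys ih => intro init; simp only [List.foldl_cons, pvInsertOrd_eq_insertBy]
  rw [h]
  rfl

-- insertBy is congruent in the comparison, pointwise over the list scanned
theorem insertBy_congr {α : Type} (b b' : α → α → Bool) (x : α) (l : List α)
    (h : ∀ y ∈ l, b x y = b' x y) :
    PySem.List.insertBy b x l = PySem.List.insertBy b' x l := by
  induction l with
  | nil => rfl
  | cons p ps ih =>
    simp only [PySem.List.insertBy]
    rw [h p (by simp)]
    by_cases hb : b' x p = true
    · simp [hb]
    · simp only [hb]
      rw [ih (fun y hy => h y (by simp [hy]))]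

-- if x goes before everything in N, inserting into P ++ N is inserting into P
theorem insertBy_append_left {α : Type} (b b' : α → α → Bool) (x : α) (P N : List α)
    (hP : ∀ y ∈ P, b x y = b' x y) (hN : ∀ n ∈ N, b x n = true) :
    PySem.List.insertBy b x (P ++ N) = PySem.List.insertBy b' x P ++ N := by
  induction P with
  | nil =>
    cases N with
    | nil => rfl
    | cons n ns => simp [PySem.List.insertBy, hN n (by simp)]
  | cons p ps ih =>
    simp only [List.cons_append, PySem.List.insertBy]
    rw [hP p (by simp)]
    by_cases hb : b' x p = true
    · simp [hb]
    · simp only [hb, if_neg, Bool.false_eq_true, not_false_eq_true]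
      rw [ih (fun y hy => hP y (by simp [hy]))]
      simp

-- if x goes after everything in P, inserting into P ++ N is inserting into N
theorem insertBy_append_right {α : Type} (b b' : α → α → Bool) (x : α) (P N : List α)
    (hP : ∀ y ∈ P, b x y = false) (hN : ∀ n ∈ N, b x n = b' x n) :
    PySem.List.insertBy b x (P ++ N) = P ++ PySem.List.insertBy b' x N := by
  induction P with
  | nil => simpa using insertBy_congr b b' x N hN
  | cons p ps ih =>
    simp only [List.cons_append, PySem.List.insertBy, hP p (by simp), Bool.false_eq_true,
      if_neg, not_false_eq_true]
    rw [ih (fun y hy => hP y (by simp [hy]))]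

-- elements of a sorted filtered list keep the filter property
theorem mem_sorted_filter {α κ : Type} [LT κ] [DecidableLT κ] (q : α → Bool) (xs : List α)
    (key : α → κ) (y : α) (hy : y ∈ PySem.List.sorted (xs.filter q) key) : q y = true := by
  rw [PySem.List.mem_sorted] at hy
  exact (List.mem_filter.mp hy).2

-- the composite-key sort is the two filtered sorts concatenated
theorem sorted2_eq_filter_append (xs : List String) (k1 : String → Bool) :
    PySem.List.sorted2 xs k1 (fun f => f)
      = PySem.List.sorted (xs.filter (fun x => !k1 x)) (fun f => f)
        ++ PySem.List.sorted (xs.filter k1) (fun f => f) := by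
  induction xs using List.reverseRecOn with
  | nil => rfl
  | append_singleton xs x ih =>
    have hlt2 : PySem.List.sorted2 (xs ++ [x]) k1 (fun f => f)
        = PySem.List.insertBy
            (fun a b => decide (k1 a < k1 b) || (!decide (k1 b < k1 a) && decide (a < b)))
            x (PySem.List.sorted2 xs k1 (fun f => f)) := by
      simp [PySem.List.sorted2, List.foldl_append]
    have hs : ∀ ys : List String, PySem.List.sorted (ys ++ [x]) (fun f => f)
        = PySem.List.insertBy (fun a b => decide (a < b)) x
            (PySem.List.sorted ys (fun f => f)) := by
      intro ys; simp [PySem.List.sorted, List.foldl_append]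
    rw [hlt2, ih, List.filter_append, List.filter_append]
    by_cases hx : k1 x = true
    · -- x is negated: it passes the whole positive block
      simp only [List.filter_singleton, hx, Bool.not_true, cond_false, cond_true,
        List.append_nil]
      rw [hs, insertBy_append_right]
      · intro y hy
        have := mem_sorted_filter (fun x => !k1 x) xs (fun f => f) y hy
        simp only [Bool.not_eq_eq_eq_not, Bool.not_true] at this
        simp [hx, this]
      · intro n hn
        have := mem_sorted_filter k1 xs (fun f => f) n hn
        simp [hx, this]
    · -- x is positive: it goes before the whole negated block
      have hx' : k1 x = false := by simpa using hx
      simp only [List.filter_singleton, hx', Bool.not_false, cond_true, cond_false,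
        List.append_nil]
      rw [hs, insertBy_append_left]
      · intro y hy
        have := mem_sorted_filter (fun x => !k1 x) xs (fun f => f) y hy
        simp only [Bool.not_eq_eq_eq_not, Bool.not_true] at this
        simp [hx', this]
      · intro n hn
        have := mem_sorted_filter k1 xs (fun f => f) n hn
        simp [hx', this]

-- ===== VERDICT (by name: the statement is the Claim_ definition above) =====
theorem normalize_term_spec : Claim_equal_normalize_term := by
  intro term _
  unfold Spec_normalize_term normalize_term normalize_term_alt
  simp only []
  by_cases h : PySem.Str.replace term " " "" = ""
  · simp [h]
  · simp only [h, if_false]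
    rw [foldl_pvInsertOrd_eq_sorted2, sorted2_eq_filter_append]
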